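-- pv_equiv track=rewrite | github.com/helix-drop/OCRandTranslation | FNM_RE/llm_repair.py | _priority_pages_for_visual_context
-- ===== SOURCE A (Python) =====
-- def _priority_pages_for_visual_context(request_cluster: dict) -> list[int]:
--     pages: list[int] = []
--     for item in request_cluster.get("unmatched_anchors") or []:
--         try:
--             page_no = int(item.get("page_no") or 0)
--         except (TypeError, ValueError):
--             page_no = 0
--         if page_no > 0:
--             pages.append(page_no)
--     for item in request_cluster.get("unmatched_note_items") or []:
--         try:
--             page_no = int(item.get("page_no") or 0)
--         except (TypeError, ValueError):
--             page_no = 0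
--         if page_no > 0:
--             pages.append(page_no)
--     ordered: list[int] = []
--     seen: set[int] = set()
--     for page_no in pages:
--         if page_no in seen:
--             continue
--         seen.add(page_no)
--         ordered.append(page_no)
--     return ordered
-- ===== SOURCE B (Python) =====
-- def _priority_pages_for_visual_context(request_cluster: dict) -> list[int]:
--     # Different decomposition: extract pages declaratively, then deduplicate by a
--     # recursive "keep head, filter it out of the tail" scheme (no seen-set).
--     def page_no(item):
--         try:
--             n = int(item.get("page_no") or 0)
--         except (TypeError, ValueError):
--             n = 0
--         return n
--
--     def dedup(pages):
--         if not pages: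
--             return []
--         head = pages[0]
--         return [head] + dedup([p for p in pages[1:] if p != head])
--
--     items = (request_cluster.get("unmatched_anchors") or []) + \
--             (request_cluster.get("unmatched_note_items") or [])
--     return dedup([p for p in map(page_no, items) if p > 0])
-- ===== Notes on version B (the rewrite author's own statement) =====
-- stated objective: alternative
-- what changed: Replaces the imperative seen-set/append deduplication over three loops by a declarative extraction (map+filter over the concatenated sources) followed by a recursive filter-out dedup that keeps each head and removes its later duplicates from the tail, using no set at all.
import Mathlib
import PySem

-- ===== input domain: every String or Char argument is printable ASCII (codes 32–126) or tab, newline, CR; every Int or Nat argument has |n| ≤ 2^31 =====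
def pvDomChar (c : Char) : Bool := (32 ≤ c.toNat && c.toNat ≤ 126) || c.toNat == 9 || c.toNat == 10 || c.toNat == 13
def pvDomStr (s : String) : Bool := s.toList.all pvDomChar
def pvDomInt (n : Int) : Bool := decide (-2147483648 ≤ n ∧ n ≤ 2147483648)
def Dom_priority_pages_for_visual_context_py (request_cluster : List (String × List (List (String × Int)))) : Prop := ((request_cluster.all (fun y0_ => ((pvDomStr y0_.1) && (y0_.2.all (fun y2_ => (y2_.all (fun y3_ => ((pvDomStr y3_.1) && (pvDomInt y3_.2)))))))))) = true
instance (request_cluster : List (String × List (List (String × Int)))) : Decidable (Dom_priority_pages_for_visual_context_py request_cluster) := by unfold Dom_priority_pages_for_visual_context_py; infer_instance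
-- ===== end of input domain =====

-- B replaces A's imperative seen-set/append deduplication over three loops by a
-- declarative map+filter extraction followed by a recursive "keep head, filter its
-- duplicates out of the tail" dedup that uses no set at all (objective: alternative).

-- ===== PORT A =====
-- int(item.get("page_no") or 0): values are Int here, so 'or 0' is getD 0 (0 is falsy)
-- and int() on an int never raises — the except branch is unreachable on this domain.
def pvPageNo (item : List (String × Int)) : Int :=
  (List.lookup "page_no" item).getD 0

def priority_pages_for_visual_context_py (request_cluster : List (String × List (List (String × Int)))) : List Int :=
  let pages := ((List.lookup "unmatched_anchors" request_cluster).getD []).foldl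
      (fun acc item => let p := pvPageNo item; if p > 0 then acc ++ [p] else acc) []
  let pages := ((List.lookup "unmatched_note_items" request_cluster).getD []).foldl
      (fun acc item => let p := pvPageNo item; if p > 0 then acc ++ [p] else acc) pages
  (pages.foldl
      (fun (st : PySem.Set Int × List Int) p =>
        if PySem.Set.contains st.1 p then st
        else (PySem.Set.add st.1 p, st.2 ++ [p]))
      (PySem.Set.empty, [])).2

-- ===== PORT B =====
-- same conversion helper as Source B's page_no (int-valued domain, see comment above)
def pvPageNoB (item : List (String × Int)) : Int :=
  (List.lookup "page_no" item).getD 0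

-- Source B's recursive dedup: keep the head, recurse on the tail with the head filtered out.
def pvDedup : List Int → List Int
  | [] => []
  | p :: rest => p :: pvDedup (rest.filter (fun q => q ≠ p))
termination_by l => l.length
decreasing_by
  refine Nat.lt_succ_of_le ?_
  rw [List.length_unattach]
  exact le_trans (List.length_filter_le _ _) (by rw [List.length_attach])

def priority_pages_for_visual_context_py_alt (request_cluster : List (String × List (List (String × Int)))) : List Int :=
  let items := ((List.lookup "unmatched_anchors" request_cluster).getD []) ++
               ((List.lookup "unmatched_note_items" request_cluster).getD [])
  pvDedup ((items.map pvPageNoB).filter (fun p => p > 0))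

-- ===== PRECONDITION & SPEC =====
def Spec_priority_pages_for_visual_context_py (request_cluster : List (String × List (List (String × Int)))) (out : List Int) : Prop := out = priority_pages_for_visual_context_py_alt request_cluster
instance (request_cluster : List (String × List (List (String × Int)))) (out : List Int) : Decidable (Spec_priority_pages_for_visual_context_py request_cluster out) := by unfold Spec_priority_pages_for_visual_context_py; infer_instance

-- ===== CLAIM (what is proved, stated in full; the proofs are below) =====
def Claim_equal_priority_pages_for_visual_context_py : Prop := ∀ (request_cluster : List (String × List (List (String × Int)))), Dom_priority_pages_for_visual_context_py request_cluster → Spec_priority_pages_for_visual_context_py request_cluster (priority_pages_for_visual_context_py request_cluster)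

-- ===== LEMMAS AND PROOFS =====

-- A's extraction loop is a filter-then-map of the items.
lemma pv_pages (l : List (List (String × Int))) (acc : List Int) :
    l.foldl (fun acc item => if pvPageNo item > 0 then acc ++ [pvPageNo item] else acc) acc
    = acc ++ (l.filter (fun item => pvPageNo item > 0)).map pvPageNo := by
  induction l generalizing acc with
  | nil => simp
  | cons it rest ih =>
    simp only [List.foldl_cons, List.filter_cons]
    by_cases h : pvPageNo it > 0
    · simp only [h, decide_true, if_true, List.map_cons, ih, List.append_assoc, List.singleton_append]
    · simp only [h, decide_false, Bool.false_eq_true, reduceIte, ih]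

lemma pv_contains_add (s : PySem.Set Int) (p q : Int) :
    PySem.Set.contains (PySem.Set.add s p) q = (PySem.Set.contains s q || q == p) := by
  simp only [PySem.Set.add, PySem.Set.contains]
  by_cases h : List.contains s p
  · by_cases hq : q = p <;> simp_all
  · by_cases hq : q = p <;> simp_all

-- A's seen-set dedup loop equals Source B's recursive filter-out dedup of the not-yet-seen pages.
lemma pv_fold_dedup (pages : List Int) (s : PySem.Set Int) (acc : List Int) :
    (pages.foldl
      (fun (st : PySem.Set Int × List Int) p =>
        if PySem.Set.contains st.1 p then st
        else (PySem.Set.add st.1 p, st.2 ++ [p]))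
      (s, acc)).2
    = acc ++ pvDedup (pages.filter (fun p => !(PySem.Set.contains s p))) := by
  induction pages generalizing s acc with
  | nil => simp [pvDedup]
  | cons p rest ih =>
    simp only [List.foldl_cons, List.filter_cons]
    by_cases h : PySem.Set.contains s p
    · simp only [h, if_true, Bool.not_true, Bool.false_eq_true, reduceIte]
      exact ih s acc
    · rw [Bool.not_eq_true] at h
      simp only [h, Bool.false_eq_true, reduceIte, Bool.not_false, if_true]
      rw [ih (PySem.Set.add s p) (acc ++ [p])]
      have hf : List.filter (fun q => !(PySem.Set.contains (PySem.Set.add s p) q)) rest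
          = (rest.filter (fun q => !(PySem.Set.contains s q))).filter (fun q => q ≠ p) := by
        rw [List.filter_filter]
        apply List.filter_congr
        intro q _
        rw [pv_contains_add]
        by_cases hq : q = p <;> simp [hq]
      rw [hf]
      simp [pvDedup]

theorem priority_pages_for_visual_context_py_spec_aux (rc : List (String × List (List (String × Int)))) :
    priority_pages_for_visual_context_py rc = priority_pages_for_visual_context_py_alt rc := by
  unfold priority_pages_for_visual_context_py priority_pages_for_visual_context_py_alt
  dsimp only
  rw [pv_pages, pv_pages, List.nil_append, pv_fold_dedup, List.nil_append]
  have hempty : ∀ L : List Int, L.filter (fun p => !(PySem.Set.contains PySem.Set.empty p)) = L := by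
    intro L; simp [PySem.Set.contains, PySem.Set.empty]
  rw [hempty]
  have hside : ∀ l : List (List (String × Int)),
      (l.filter (fun it => pvPageNo it > 0)).map pvPageNo
      = (l.map pvPageNoB).filter (fun p => p > 0) := by
    intro l
    rw [List.filter_map]
    rfl
  rw [List.map_append, List.filter_append, hside, hside]

-- ===== VERDICT (by name: the statement is the Claim_ definition above) =====
theorem priority_pages_for_visual_context_py_spec : Claim_equal_priority_pages_for_visual_context_py := by
  intro rc _
  exact priority_pages_for_visual_context_py_spec_aux rc
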